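-- pv_equiv track=rewrite | github.com/yeahhh1e/Algorithm | STUDY/프로그래머스/기능개발/sol4.py | solution
-- ===== SOURCE A (Python) =====
-- import math
--
-- def solution(progresses, speeds):
--     answer = []
--
--     n = len(progresses) # n은 progresses와 speeds 배열의 길이이자 작업의 개수
--     period_list = []
--
--     for i in range(n): # 0부터 끝까지 순회
--         progress = progresses[i]
--         speed = speeds[i]
--         period = math.ceil((100 - progress) / speed) # 남은 개발 기간
--
--         period_list.append(period) # 개발 기간 리스트에 각각의 남은 개발 기간 추가
--
--     return_list = [0]*101 # 개발기간이 아무리 길어도 100을 넘지 않으므로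
--
--     for i in range(len(period_list)): # 개발 기간 리스트 순회
--         if period_list[i] == 999:
--             pass
--         else:
--             day = period_list[i] # 몇번째 날인지 저장
--             count = 1 # 개발한 기능의 수를 저장할 변수
--             for j in range(i+1, len(period_list)): # i번째 다음부터 순회
--
--                 if period_list[i] >= period_list[j]: # 리스트를 순회하며 i번째 기간보다 더 큰 기간이 나오기 전까지 기능 수 +1
--                     count += 1
--                     if j == len(period_list)-1: # 마지막 인덱스까지 순회했다면 탐색이 끝났으므로 999로 바꿔주기
--                         period_list[i:j+1] = [999] * (j+1 - i)
--                 else: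
--                     period_list[i:j] = [999]  * (j - i) # count에 추가한 기능은 999로 바꿔 탐색에서 제외시키기
--                     break
--
--             answer.append(count) # 개발 완료된 기능을 해당 날짜에 추가
--
--     return answer
-- ===== SOURCE B (Python) =====
-- def solution(progresses, speeds):
--     # One pass: keep the current batch leader's period; a task whose period
--     # exceeds it starts a new batch.  Exact integer ceiling via -((p-100)//s).
--     answer = []
--     leader = None
--     count = 0
--     for p, s in zip(progresses, speeds):
--         period = -((p - 100) // s)
--         if leader is None:
--             leader, count = period, 1
--         elif period > leader:
--             answer.append(count)
--             leader, count = period, 1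
--         else:
--             count += 1
--     if count:
--         answer.append(count)
--     return answer
-- ===== Notes on version B (the rewrite author's own statement) =====
-- stated objective: faster
-- what changed: Replaces A's quadratic scan-and-mark (inner rescans with a 999 sentinel written back into the period list) with a single pass that tracks the current batch leader's period and starts a new batch when a period exceeds it; the float math.ceil is replaced by exact integer ceiling division.
-- intended difference: On inputs where some task's completion period is exactly 999 and every earlier task's period is smaller (so it would lead a deploy batch), A mistakes the genuine period 999 for its internal 'already processed' sentinel and silently drops that batch leader from the count; B counts it normally, which is the intended batching. — e.g. on solution([-899], [1]): A returns [], B returns [1]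
import Mathlib
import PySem

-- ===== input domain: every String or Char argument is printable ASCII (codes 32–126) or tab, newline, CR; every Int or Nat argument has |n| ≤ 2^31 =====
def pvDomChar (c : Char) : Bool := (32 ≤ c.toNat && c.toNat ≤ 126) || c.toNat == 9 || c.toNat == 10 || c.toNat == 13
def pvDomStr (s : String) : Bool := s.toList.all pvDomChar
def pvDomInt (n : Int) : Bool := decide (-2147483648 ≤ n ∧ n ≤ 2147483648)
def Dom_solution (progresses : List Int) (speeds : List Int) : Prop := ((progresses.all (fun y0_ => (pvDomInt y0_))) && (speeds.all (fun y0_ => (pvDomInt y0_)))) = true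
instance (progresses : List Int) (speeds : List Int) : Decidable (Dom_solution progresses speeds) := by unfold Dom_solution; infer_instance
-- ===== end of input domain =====

-- B replaces A's quadratic scan-and-mark over the period list by a single pass tracking the
-- current batch leader's period (faster in a timing run); equivalence is about the return
-- value (A only mutates its local period_list, no argument).

-- ===== PORT A =====
-- math.ceil((100-progress)/speed) on ints: exact integer ceiling -((-(100-p)) // s);
-- exact on Dom (|operands| ≤ 2^31+100 < 2^53, so the float division's ceil equals the exact one).
-- port of `period_list[i:j] = [999]*(j-i)` (A only calls it with 0 ≤ i ≤ j ≤ len)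
def pvSetRange (pl : List Int) (i j : Nat) : List Int :=
  pl.take i ++ List.replicate (j - i) (999 : Int) ++ pl.drop j

-- the inner `for j in range(i+1, len)` loop; loop counters are Nat, in-range reads are getD
def pvInnerA (pl : List Int) (i : Nat) (j : Nat) (count : Int) : List Int × Int :=
  if h : j < pl.length then
    if pl.getD i 0 ≥ pl.getD j 0 then
      (if j = pl.length - 1 then (pvSetRange pl i (j + 1), count + 1)
       else pvInnerA pl i (j + 1) (count + 1))
    else (pvSetRange pl i j, count)
  else (pl, count)
termination_by pl.length - j

-- the outer `for i in range(len(period_list))` loop (fuel = list length, fixed)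
def pvOuterA : Nat → List Int → Nat → List Int → List Int
  | 0, _, _, ans => ans
  | fuel + 1, pl, i, ans =>
    if i < pl.length then
      if pl.getD i 0 = 999 then pvOuterA fuel pl (i + 1) ans
      else
        let r := pvInnerA pl i (i + 1) 1
        pvOuterA fuel r.1 (i + 1) (ans ++ [r.2])
    else ans

def solution (progresses : List Int) (speeds : List Int) : List Int :=
  let n := progresses.length
  let period_list := (List.range n).map (fun (i : Nat) =>
    -(PySem.Int.floordiv (-(100 - PySem.List.pyGetD progresses (i : Int) 0))
        (PySem.List.pyGetD speeds (i : Int) 0)))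
  pvOuterA period_list.length period_list 0 []

-- ===== PORT B =====
-- one step of B's single pass: state (answer, leader, count)
def pvStepB (st : List Int × Option Int × Int) (pr : Int × Int) : List Int × Option Int × Int :=
  let period := -(PySem.Int.floordiv (pr.1 - 100) pr.2)
  match st with
  | (ans, none, _) => (ans, some period, 1)
  | (ans, some L, c) => if period > L then (ans ++ [c], some period, 1) else (ans, some L, c + 1)

def solution_alt (progresses : List Int) (speeds : List Int) : List Int :=
  let r := (List.zip progresses speeds).foldl pvStepB ([], none, 0)
  if r.2.2 ≠ 0 then r.1 ++ [r.2.2] else r.1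

-- ===== PRECONDITION & SPEC =====
-- Pre_ excludes exactly the inputs where A raises: speeds shorter than progresses (IndexError)
-- or a zero among the used speeds (ZeroDivisionError).
def Pre_solution (progresses : List Int) (speeds : List Int) : Prop :=
  progresses.length ≤ speeds.length ∧ ∀ s ∈ speeds.take progresses.length, s ≠ 0

instance (progresses : List Int) (speeds : List Int) : Decidable (Pre_solution progresses speeds) := by
  unfold Pre_solution; infer_instance

def pvWitness_solution : List Int × List Int := ([30, 55, 95], [30, 5, 1])

-- On inputs where some task's period is exactly 999 and every earlier period is smaller (so it
-- would lead a deploy batch — i.e. the first period ≥ 999 equals 999), A mistakes the genuine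
-- period 999 for its internal 'processed' sentinel and silently drops that batch leader from
-- the count; B counts it normally, which is the intended batching.
def D_solution (progresses : List Int) (speeds : List Int) : Prop :=
  (((List.zipWith (fun p s => -(PySem.Int.floordiv (p - 100) s)) progresses speeds).dropWhile
      (fun q => decide (q < 999))).head?) = some 999

instance (progresses : List Int) (speeds : List Int) : Decidable (D_solution progresses speeds) := by
  unfold D_solution; infer_instance

def Spec_solution (progresses : List Int) (speeds : List Int) (out : List Int) : Prop :=
  ¬ D_solution progresses speeds → out = solution_alt progresses speeds

instance (progresses : List Int) (speeds : List Int) (out : List Int) : Decidable (Spec_solution progresses speeds out) := by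
  unfold Spec_solution; infer_instance

def pvDiffWitness_solution : List Int × List Int := ([-899], [1])
def pvDiffWitnessOut_solution : (List Int) × (List Int) := ([], [1])

-- ===== CLAIM (what is proved, stated in full; the proofs are below) =====
def Claim_unchanged_solution : Prop := ∀ (progresses : List Int) (speeds : List Int), Dom_solution progresses speeds → Pre_solution progresses speeds → Spec_solution progresses speeds (solution progresses speeds)
def Claim_exact_solution : Prop := ∀ (progresses : List Int) (speeds : List Int), Dom_solution progresses speeds → Pre_solution progresses speeds → D_solution progresses speeds → solution progresses speeds ≠ solution_alt progresses speeds
def Claim_changed_solution : Prop := Dom_solution (pvDiffWitness_solution.1) (pvDiffWitness_solution.2) ∧ Pre_solution (pvDiffWitness_solution.1) (pvDiffWitness_solution.2) ∧ D_solution (pvDiffWitness_solution.1) (pvDiffWitness_solution.2) ∧ solution (pvDiffWitness_solution.1) (pvDiffWitness_solution.2) = pvDiffWitnessOut_solution.1 ∧ solution_alt (pvDiffWitness_solution.1) (pvDiffWitness_solution.2) = pvDiffWitnessOut_solution.2 ∧ pvDiffWitnessOut_solution.1 ≠ pvDiffWitnessOut_solution.2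

-- ===== LEMMAS AND PROOFS =====

-- the list of completion periods (used only by the proofs)
def pvPeriods (progresses : List Int) (speeds : List Int) : List Int :=
  List.zipWith (fun p s => -(PySem.Int.floordiv (p - 100) s)) progresses speeds

-- pvRecAux t m = "some strict prefix-record of t relative to running maximum m equals 999"
def pvRecAux : List Int → Int → Bool
  | [], _ => false
  | h :: t, m => if m < h then (h == 999 || pvRecAux t h) else pvRecAux t m

def pvRec999 : List Int → Bool
  | [] => false
  | h :: t => h == 999 || pvRecAux t h

theorem pv_recAux_big (t : List Int) : ∀ m : Int, 999 < m → pvRecAux t m = false := by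
  induction t with
  | nil => intro m _; rfl
  | cons x t ih =>
    intro m hm
    by_cases hx : m < x
    · have h9 : (x == 999) = false := by simp; omega
      simp only [pvRecAux, if_pos hx, h9, Bool.false_or]
      exact ih x (by omega)
    · simp only [pvRecAux, if_neg hx]
      exact ih m hm

theorem pv_recAux_iff (t : List Int) : ∀ m : Int, m < 999 →
    (pvRecAux t m = true ↔ ((t.dropWhile (fun q => decide (q < 999))).head?) = some 999) := by
  induction t with
  | nil => intro m _; simp [pvRecAux]
  | cons x t ih =>
    intro m hm
    rcases lt_trichotomy x 999 with hx | hx | hx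
    · have hdw : (x :: t).dropWhile (fun q => decide (q < 999))
          = t.dropWhile (fun q => decide (q < 999)) := by
        simp [List.dropWhile_cons, hx]
      rw [hdw]
      by_cases hmx : m < x
      · have h9 : (x == 999) = false := by simp; omega
        simp only [pvRecAux, if_pos hmx, h9, Bool.false_or]
        exact ih x hx
      · simp only [pvRecAux, if_neg hmx]
        exact ih m hm
    · subst hx
      simp [pvRecAux, List.dropWhile_cons, hm]
    · have hdw : ((x :: t).dropWhile (fun q => decide (q < 999))).head? = some x := by
        simp [List.dropWhile_cons, not_lt.2 (le_of_lt hx)]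
      rw [hdw]
      have h9 : (x == 999) = false := by simp; omega
      simp only [pvRecAux, if_pos (show m < x by omega), h9, Bool.false_or,
        pv_recAux_big t x (by omega)]
      constructor
      · intro hfalse; exact absurd hfalse (by simp)
      · intro hsome; exact absurd (Option.some.inj hsome) (by omega)

theorem pv_rec999_iff (q : List Int) :
    pvRec999 q = true ↔ ((q.dropWhile (fun x => decide (x < 999))).head?) = some 999 := by
  cases q with
  | nil => simp [pvRec999]
  | cons h t =>
    rcases lt_trichotomy h 999 with hx | hx | hx
    · have h9 : (h == 999) = false := by simp; omega
      simp only [pvRec999, h9, Bool.false_or]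
      rw [pv_recAux_iff t h hx]
      simp [List.dropWhile_cons, hx]
    · subst hx
      simp [pvRec999, List.dropWhile_cons]
    · have h9 : (h == 999) = false := by simp; omega
      have hd : decide (h < 999) = false := by simp; omega
      constructor
      · intro hfalse
        exact absurd hfalse (by simp [pvRec999, h9, pv_recAux_big t h hx])
      · intro hsome
        have hh : ((h :: t).dropWhile (fun x => decide (x < 999))).head? = some h := by
          simp [List.dropWhile_cons, hd]
        rw [hh] at hsome
        exact absurd (Option.some.inj hsome) (by omega)

-- the grouping both programs compute: batch sizes, each batch led by its first period
def pvGrp : List Int → List Int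
  | [] => []
  | h :: t =>
    (1 + ((t.takeWhile (fun x => decide (x ≤ h))).length : Int))
      :: pvGrp (t.dropWhile (fun x => decide (x ≤ h)))
termination_by l => l.length
decreasing_by
  have := List.length_dropWhile_le (fun x => decide (x ≤ h)) t
  simp only [List.length_cons]; omega

theorem pv_pyGetD_cons_succ (x : Int) (xs : List Int) (i : Nat) (d : Int) :
    PySem.List.pyGetD (x :: xs) ((i : Int) + 1) d = PySem.List.pyGetD xs (i : Int) d := by
  rw [show ((i : Int) + 1) = ((i + 1 : Nat) : Int) by push_cast; ring,
    PySem.List.pyGetD_natCast, PySem.List.pyGetD_natCast, List.getD_cons_succ]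

theorem pv_periodsA_eq (ps ss : List Int) (h : ps.length ≤ ss.length) :
    (List.range ps.length).map (fun (i : Nat) =>
      -(PySem.Int.floordiv (-(100 - PySem.List.pyGetD ps (i : Int) 0))
          (PySem.List.pyGetD ss (i : Int) 0))) = pvPeriods ps ss := by
  induction ps generalizing ss with
  | nil => simp [pvPeriods]
  | cons p pt ih =>
    cases ss with
    | nil => simp at h
    | cons s st =>
      simp only [List.length_cons, List.range_succ_eq_map, List.map_cons, List.map_map,
        pvPeriods, List.zipWith_cons_cons]
      refine congrArg₂ List.cons ?_ ?_
      · simp [neg_sub]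
      · rw [show List.zipWith (fun p s => -PySem.Int.floordiv (p - 100) s) pt st = pvPeriods pt st from rfl,
          ← ih st (by simpa using h)]
        refine List.map_congr_left fun i hi => ?_
        simp only [Function.comp, Nat.succ_eq_add_one, Nat.cast_add, Nat.cast_one,
          pv_pyGetD_cons_succ]

-- B's step expressed on an already-computed period
def pvStepQ (st : List Int × Option Int × Int) (q : Int) : List Int × Option Int × Int :=
  match st with
  | (ans, none, _) => (ans, some q, 1)
  | (ans, some L, c) => if q > L then (ans ++ [c], some q, 1) else (ans, some L, c + 1)

def pvWrap (r : List Int × Option Int × Int) : List Int :=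
  if r.2.2 ≠ 0 then r.1 ++ [r.2.2] else r.1

theorem pv_foldB_eq (ps ss : List Int) (st : List Int × Option Int × Int) :
    (List.zip ps ss).foldl pvStepB st = (pvPeriods ps ss).foldl pvStepQ st := by
  rw [show pvPeriods ps ss = List.zipWith (fun p s => -(PySem.Int.floordiv (p - 100) s)) ps ss from rfl,
    ← List.map_uncurry_zip_eq_zipWith, List.foldl_map]
  have hfun : (fun (acc : List Int × Option Int × Int) (x : Int × Int) =>
      pvStepQ acc (Function.uncurry (fun p s => -(PySem.Int.floordiv (p - 100) s)) x)) = pvStepB := by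
    funext acc x
    rcases acc with ⟨ans, L, c⟩
    rcases L with _ | L <;> rfl
  rw [hfun]

theorem pv_G (q : List Int) : ∀ (ans : List Int) (L c : Int), 0 < c →
    pvWrap (q.foldl pvStepQ (ans, some L, c))
      = ans ++ (c + ((q.takeWhile (fun x => decide (x ≤ L))).length : Int))
          :: pvGrp (q.dropWhile (fun x => decide (x ≤ L))) := by
  induction q with
  | nil =>
    intro ans L c hc
    simp [pvWrap, pvGrp]
    omega
  | cons h t ih =>
    intro ans L c hc
    by_cases hL : h ≤ L
    · have hstep : pvStepQ (ans, some L, c) h = (ans, some L, c + 1) := by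
        simp [pvStepQ, not_lt.2 hL]
      rw [List.foldl_cons, hstep, ih ans L (c + 1) (by omega)]
      simp [List.takeWhile_cons, List.dropWhile_cons, hL]
      push_cast
      ring_nf
    · have hgt : L < h := lt_of_not_ge hL
      have hstep : pvStepQ (ans, some L, c) h = (ans ++ [c], some h, 1) := by
        simp [pvStepQ, hgt]
      rw [List.foldl_cons, hstep, ih (ans ++ [c]) h 1 one_pos]
      simp [List.takeWhile_cons, List.dropWhile_cons, hL, pvGrp]

theorem pv_altB_eq (ps ss : List Int) : solution_alt ps ss = pvGrp (pvPeriods ps ss) := by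
  show pvWrap ((List.zip ps ss).foldl pvStepB ([], none, 0)) = _
  rw [pv_foldB_eq]
  cases hq : pvPeriods ps ss with
  | nil => simp [pvWrap, pvGrp]
  | cons h t =>
    rw [List.foldl_cons, show pvStepQ ([], none, 0) h = ([], some h, 1) from rfl,
      pv_G t [] h 1 one_pos]
    simp [pvGrp]

theorem pv_getD_mid (a : List Int) (x : Int) (b : List Int) :
    (a ++ x :: b).getD a.length 0 = x := by
  induction a with
  | nil => rfl
  | cons y a ih => simpa using ih

theorem pv_getD_rep (m i : Nat) (q : List Int) (h : i < m) :
    (List.replicate m (999 : Int) ++ q).getD i 0 = 999 := by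
  rw [List.getD_append _ _ _ i (by simpa using h)]
  exact List.getD_replicate _ h

theorem pv_setRange_eq (m : Nat) (h : Int) (c t₂ : List Int) :
    pvSetRange (List.replicate m (999 : Int) ++ h :: (c ++ t₂)) m (m + 1 + c.length)
      = List.replicate (m + 1 + c.length) (999 : Int) ++ t₂ := by
  unfold pvSetRange
  have h1 : (List.replicate m (999 : Int) ++ h :: (c ++ t₂)).take m
      = List.replicate m (999 : Int) := List.take_left' (by simp)
  have h2 : (List.replicate m (999 : Int) ++ h :: (c ++ t₂)).drop (m + 1 + c.length) = t₂ := by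
    rw [show List.replicate m (999 : Int) ++ h :: (c ++ t₂)
        = (List.replicate m (999 : Int) ++ h :: c) ++ t₂ by simp]
    exact List.drop_left' (by simp; omega)
  rw [h1, h2, show m + 1 + c.length - m = c.length + 1 by omega,
    show m + 1 + c.length = m + (c.length + 1) by omega]
  simp [List.replicate_add, List.replicate_succ']

theorem pv_innerA_eq (u : List Int) : ∀ (c0 : Int) (m : Nat) (c t₂ : List Int) (h : Int),
    (∀ x ∈ c, x ≤ h) → (∀ x ∈ u, x ≤ h) → (∀ y, t₂.head? = some y → h < y) →
    (u ≠ [] ∨ t₂ ≠ []) →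
    pvInnerA (List.replicate m 999 ++ h :: (c ++ u ++ t₂)) m (m + 1 + c.length) c0
      = (List.replicate (m + 1 + c.length + u.length) (999 : Int) ++ t₂, c0 + (u.length : Int)) := by
  induction u with
  | nil =>
    intro c0 m c t₂ h hc _ ht₂ hne
    rcases t₂ with _ | ⟨y, t₂'⟩
    · simp at hne
    have hy : h < y := ht₂ y rfl
    rw [pvInnerA]
    rw [dif_pos (by simp; omega)]
    have hgm : (List.replicate m (999 : Int) ++ h :: (c ++ [] ++ (y :: t₂'))).getD m 0 = h := by
      rw [show List.replicate m (999 : Int) ++ h :: (c ++ [] ++ (y :: t₂'))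
          = List.replicate m (999 : Int) ++ h :: (c ++ [] ++ (y :: t₂')) from rfl]
      have := pv_getD_mid (List.replicate m (999 : Int)) h (c ++ [] ++ (y :: t₂'))
      simpa using this
    have hgj : (List.replicate m (999 : Int) ++ h :: (c ++ [] ++ (y :: t₂'))).getD (m + 1 + c.length) 0 = y := by
      have := pv_getD_mid (List.replicate m (999 : Int) ++ h :: c) y t₂'
      rw [show List.replicate m (999 : Int) ++ h :: (c ++ [] ++ (y :: t₂'))
          = (List.replicate m (999 : Int) ++ h :: c) ++ y :: t₂' by simp] at *
      simpa [Nat.add_comm, Nat.add_assoc, Nat.add_left_comm] using this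
    rw [hgm, hgj, if_neg (by omega)]
    have := pv_setRange_eq m h c (y :: t₂')
    rw [show c ++ [] ++ y :: t₂' = c ++ y :: t₂' by simp, this]
    simp
  | cons u₀ u' ih =>
    intro c0 m c t₂ h hc hu ht₂ _
    have hu₀ : u₀ ≤ h := hu u₀ (by simp)
    rw [pvInnerA]
    rw [dif_pos (by simp; omega)]
    have hgm : (List.replicate m (999 : Int) ++ h :: (c ++ (u₀ :: u') ++ t₂)).getD m 0 = h := by
      have := pv_getD_mid (List.replicate m (999 : Int)) h (c ++ (u₀ :: u') ++ t₂)
      simpa using this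
    have hgj : (List.replicate m (999 : Int) ++ h :: (c ++ (u₀ :: u') ++ t₂)).getD (m + 1 + c.length) 0 = u₀ := by
      have := pv_getD_mid (List.replicate m (999 : Int) ++ h :: c) u₀ (u' ++ t₂)
      rw [show List.replicate m (999 : Int) ++ h :: (c ++ (u₀ :: u') ++ t₂)
          = (List.replicate m (999 : Int) ++ h :: c) ++ u₀ :: (u' ++ t₂) by simp] at *
      simpa [Nat.add_comm, Nat.add_assoc, Nat.add_left_comm] using this
    rw [hgm, hgj, if_pos hu₀]
    by_cases hend : u' = [] ∧ t₂ = []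
    · obtain ⟨hu', ht⟩ := hend
      subst hu' ht
      rw [if_pos (by simp; omega)]
      have := pv_setRange_eq m h (c ++ [u₀]) []
      rw [show List.replicate m (999 : Int) ++ h :: (c ++ [u₀] ++ [])
          = List.replicate m (999 : Int) ++ h :: ((c ++ [u₀]) ++ []) by simp] at this
      rw [show List.replicate m (999 : Int) ++ h :: (c ++ ([u₀]) ++ ([] : List Int))
          = List.replicate m (999 : Int) ++ h :: ((c ++ [u₀]) ++ []) by simp,
        show m + 1 + c.length + 1 = m + 1 + (c ++ [u₀]).length by
          simp only [List.length_append, List.length_cons, List.length_nil]; omega,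
        this,
        show m + 1 + c.length + ([u₀] : List Int).length = m + 1 + (c ++ [u₀]).length by
          simp only [List.length_append, List.length_cons, List.length_nil]; omega]
      simp
    · have hlt0 : 0 < u'.length + t₂.length := by
        rcases (not_and_or.1 hend) with hx | hx
        · cases u' with
          | nil => exact absurd rfl hx
          | cons a b => simp
        · cases t₂ with
          | nil => exact absurd rfl hx
          | cons a b => simp
      rw [if_neg (by simp; omega)]
      have hne' : u' ≠ [] ∨ t₂ ≠ [] := by tauto
      have := ih (c0 + 1) m (c ++ [u₀]) t₂ h
        (by intro x hx; rcases List.mem_append.1 hx with hx | hx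
            · exact hc x hx
            · simp at hx; subst hx; exact hu₀)
        (fun x hx => hu x (by simp [hx]))
        ht₂ hne'
      rw [show List.replicate m (999 : Int) ++ h :: (c ++ (u₀ :: u') ++ t₂)
          = List.replicate m (999 : Int) ++ h :: ((c ++ [u₀]) ++ u' ++ t₂) by simp,
        show m + 1 + c.length + 1 = m + 1 + (c ++ [u₀]).length by
          simp only [List.length_append, List.length_cons, List.length_nil]; omega,
        this,
        show m + 1 + c.length + (u₀ :: u').length = m + 1 + (c ++ [u₀]).length + u'.length by
          simp only [List.length_append, List.length_cons, List.length_nil]; omega]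
      simp only [Prod.mk.injEq, List.length_cons, true_and]
      push_cast
      ring

theorem pv_recAux_skip (u : List Int) : ∀ (v : List Int) (m : Int),
    (∀ x ∈ u, x ≤ m) → pvRecAux (u ++ v) m = pvRecAux v m := by
  induction u with
  | nil => intro v m _; rfl
  | cons x u ih =>
    intro v m hx
    have : ¬ m < x := not_lt.2 (hx x (by simp))
    simp only [List.cons_append, pvRecAux, if_neg this]
    exact ih v m (fun y hy => hx y (by simp [hy]))

theorem pv_rec999_drop (h : Int) (t : List Int) (hr : pvRec999 (h :: t) = false) :
    pvRec999 (t.dropWhile (fun x => decide (x ≤ h))) = false := by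
  have haux : pvRecAux t h = false := by
    simp only [pvRec999, Bool.or_eq_false_iff] at hr
    exact hr.2
  have hsplit := List.takeWhile_append_dropWhile (p := fun x => decide (x ≤ h)) (l := t)
  have htw : ∀ x ∈ t.takeWhile (fun x => decide (x ≤ h)), x ≤ h := by
    intro x hx
    simpa using List.mem_takeWhile_imp hx
  have haux2 : pvRecAux (t.dropWhile (fun x => decide (x ≤ h))) h = false := by
    rw [← pv_recAux_skip _ _ _ htw, hsplit]
    exact haux
  rcases hd : t.dropWhile (fun x => decide (x ≤ h)) with _ | ⟨y, t₂⟩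
  · rfl
  · have hy : ¬ (y ≤ h) := by
      have h5 := List.head?_dropWhile_not (fun x => decide (x ≤ h)) t
      rw [hd] at h5
      simpa using h5
    rw [hd] at haux2
    simp only [pvRecAux, if_pos (lt_of_not_ge hy)] at haux2
    simp only [pvRec999]
    exact haux2

theorem pv_outerA_stop (fuel : Nat) (pl : List Int) (i : Nat) (ans : List Int)
    (h : pl.length ≤ i) : pvOuterA fuel pl i ans = ans := by
  cases fuel with
  | zero => rfl
  | succ fuel => simp [pvOuterA, Nat.not_lt.2 h]

theorem pv_outerA_eq (fuel : Nat) : ∀ (m i : Nat) (q ans : List Int),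
    pvRec999 q = false → i ≤ m → m + q.length ≤ fuel + i →
    pvOuterA fuel (List.replicate m 999 ++ q) i ans = ans ++ pvGrp q := by
  induction fuel with
  | zero =>
    intro m i q ans _ him hfuel
    have hq : q = [] := by
      cases q with
      | nil => rfl
      | cons a b => exfalso; simp at hfuel; omega
    subst hq
    simp [pvOuterA, pvGrp]
  | succ fuel ih =>
    intro m i q ans hrec him hfuel
    rcases Nat.lt_or_ge i m with hlt | hge
    · -- still inside the 999 prefix: skip
      have hgi : (List.replicate m (999 : Int) ++ q).getD i 0 = 999 := pv_getD_rep m i q hlt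
      have hil : i < (List.replicate m (999 : Int) ++ q).length := by simp; omega
      simp only [pvOuterA, if_pos hil, hgi, if_pos rfl]
      exact ih m (i + 1) q ans hrec (by omega) (by omega)
    · have him' : i = m := le_antisymm him hge
      subst him'
      rcases q with _ | ⟨h, t⟩
      · rw [pv_outerA_stop (fuel + 1) _ _ ans (by simp)]
        simp [pvGrp]
      · have hh : h ≠ 999 := by
          simp only [pvRec999, Bool.or_eq_false_iff, beq_eq_false_iff_ne] at hrec
          exact hrec.1
        have hgm : (List.replicate i (999 : Int) ++ h :: t).getD i 0 = h := by
          have := pv_getD_mid (List.replicate i (999 : Int)) h t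
          simpa using this
        have hil : i < (List.replicate i (999 : Int) ++ h :: t).length := by simp
        simp only [pvOuterA, if_pos hil, hgm, if_neg hh]
        by_cases ht : t = []
        · subst ht
          have hinner : pvInnerA (List.replicate i (999 : Int) ++ [h]) i (i + 1) 1
              = (List.replicate i (999 : Int) ++ [h], 1) := by
            rw [pvInnerA, dif_neg (by simp)]
          rw [hinner]
          rw [pv_outerA_stop fuel _ (i + 1) _ (by simp)]
          simp [pvGrp]
        · have hsplit : t.takeWhile (fun x => decide (x ≤ h)) ++ t.dropWhile (fun x => decide (x ≤ h)) = t :=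
            List.takeWhile_append_dropWhile
          have htw : ∀ x ∈ t.takeWhile (fun x => decide (x ≤ h)), x ≤ h := by
            intro x hx
            simpa using List.mem_takeWhile_imp hx
          have hdw : ∀ y, (t.dropWhile (fun x => decide (x ≤ h))).head? = some y → h < y := by
            intro y hy
            have hne : t.dropWhile (fun x => decide (x ≤ h)) ≠ [] := by
              intro hnil; rw [hnil] at hy; simp at hy
            have := List.head_dropWhile_not (fun x => decide (x ≤ h)) hne
            rw [List.head?_eq_head hne] at hy
            rw [Option.some.injEq] at hy
            rw [hy] at this
            simpa using lt_of_not_ge (by simpa using this)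
          have hne2 : t.takeWhile (fun x => decide (x ≤ h)) ≠ [] ∨ t.dropWhile (fun x => decide (x ≤ h)) ≠ [] := by
            by_contra hcon
            push_neg at hcon
            rw [hcon.1, hcon.2] at hsplit
            exact ht hsplit.symm
          have hinner := pv_innerA_eq (t.takeWhile (fun x => decide (x ≤ h))) 1 i []
            (t.dropWhile (fun x => decide (x ≤ h))) h (by simp) htw hdw hne2
          simp only [List.nil_append, List.length_nil, Nat.add_zero] at hinner
          rw [hsplit] at hinner
          rw [hinner]
          have hrec' := pv_rec999_drop h t hrec
          have := ih (i + 1 + (t.takeWhile (fun x => decide (x ≤ h))).length) (i + 1)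
            (t.dropWhile (fun x => decide (x ≤ h))) (ans ++ [1 + ((t.takeWhile (fun x => decide (x ≤ h))).length : Int)])
            hrec' (by omega)
            (by have hlen : (t.takeWhile (fun x => decide (x ≤ h))).length
                  + (t.dropWhile (fun x => decide (x ≤ h))).length = t.length := by
                  rw [← List.length_append, hsplit]
                simp only [List.length_cons] at hfuel
                omega)
          rw [this]
          simp [pvGrp]

theorem pv_grp_sum (q : List Int) : (pvGrp q).sum = (q.length : Int) := by
  induction q using pvGrp.induct with
  | case1 => simp [pvGrp]
  | case2 h t ih =>
    have hlen : (t.takeWhile (fun x => decide (x ≤ h))).length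
        + (t.dropWhile (fun x => decide (x ≤ h))).length = t.length := by
      rw [← List.length_append, List.takeWhile_append_dropWhile]
    simp only [pvGrp, List.sum_cons, ih, List.length_cons]
    push_cast
    omega

theorem pv_rec999_drop_true (h : Int) (t : List Int) (hh : h ≠ 999)
    (hr : pvRec999 (h :: t) = true) :
    h < 999 ∧ pvRec999 (t.dropWhile (fun x => decide (x ≤ h))) = true := by
  have haux : pvRecAux t h = true := by
    simp only [pvRec999, Bool.or_eq_true, beq_iff_eq] at hr
    rcases hr with hr | hr
    · exact absurd hr hh
    · exact hr
  have hlt : h < 999 := by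
    rcases lt_trichotomy h 999 with hx | hx | hx
    · exact hx
    · exact absurd hx hh
    · rw [pv_recAux_big t h hx] at haux; exact absurd haux (by simp)
  refine ⟨hlt, ?_⟩
  have htw : ∀ x ∈ t.takeWhile (fun x => decide (x ≤ h)), x ≤ h := by
    intro x hx
    simpa using List.mem_takeWhile_imp hx
  have haux2 : pvRecAux (t.dropWhile (fun x => decide (x ≤ h))) h = true := by
    rw [← pv_recAux_skip _ _ _ htw, List.takeWhile_append_dropWhile]
    exact haux
  rcases hd : t.dropWhile (fun x => decide (x ≤ h)) with _ | ⟨y, t₂⟩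
  · rw [hd] at haux2; exact absurd haux2 (by simp [pvRecAux])
  · have hy : ¬ (y ≤ h) := by
      have h5 := List.head?_dropWhile_not (fun x => decide (x ≤ h)) t
      rw [hd] at h5
      simpa using h5
    rw [hd] at haux2
    simp only [pvRecAux, if_pos (lt_of_not_ge hy)] at haux2
    simp only [pvRec999]
    exact haux2

-- non-strict bound: the outer loop's counts cover at most the remaining cells
theorem pv_outerA_le (fuel : Nat) : ∀ (m i : Nat) (q ans : List Int),
    i ≤ m → m + q.length ≤ fuel + i →
    (pvOuterA fuel (List.replicate m 999 ++ q) i ans).sum ≤ ans.sum + (q.length : Int) := by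
  induction fuel with
  | zero =>
    intro m i q ans him hfuel
    have hq : q = [] := by
      cases q with
      | nil => rfl
      | cons a b => exfalso; simp at hfuel; omega
    subst hq
    simp [pvOuterA]
  | succ fuel ih =>
    intro m i q ans him hfuel
    rcases Nat.lt_or_ge i m with hlt | hge
    · have hgi : (List.replicate m (999 : Int) ++ q).getD i 0 = 999 := pv_getD_rep m i q hlt
      have hil : i < (List.replicate m (999 : Int) ++ q).length := by simp; omega
      simp only [pvOuterA, if_pos hil, hgi, if_pos rfl]
      exact ih m (i + 1) q ans (by omega) (by omega)
    · have him' : i = m := le_antisymm him hge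
      subst him'
      rcases q with _ | ⟨h, t⟩
      · rw [pv_outerA_stop (fuel + 1) _ _ ans (by simp)]
        simp
      · have hgm : (List.replicate i (999 : Int) ++ h :: t).getD i 0 = h := by
          have := pv_getD_mid (List.replicate i (999 : Int)) h t
          simpa using this
        have hil : i < (List.replicate i (999 : Int) ++ h :: t).length := by simp
        by_cases hh : h = 999
        · subst hh
          simp only [pvOuterA, if_pos hil, hgm, if_pos rfl]
          have hrw : List.replicate i (999 : Int) ++ 999 :: t
              = List.replicate (i + 1) (999 : Int) ++ t := by
            simp [List.replicate_succ']
          rw [hrw]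
          have := ih (i + 1) (i + 1) t ans (le_refl _) (by simp at hfuel; omega)
          simp only [List.length_cons]
          push_cast
          omega
        · simp only [pvOuterA, if_pos hil, hgm, if_neg hh]
          by_cases ht : t = []
          · subst ht
            have hinner : pvInnerA (List.replicate i (999 : Int) ++ [h]) i (i + 1) 1
                = (List.replicate i (999 : Int) ++ [h], 1) := by
              rw [pvInnerA, dif_neg (by simp)]
            rw [hinner, pv_outerA_stop fuel _ (i + 1) _ (by simp)]
            simp
          · have hsplit : t.takeWhile (fun x => decide (x ≤ h)) ++ t.dropWhile (fun x => decide (x ≤ h)) = t :=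
              List.takeWhile_append_dropWhile
            have htw : ∀ x ∈ t.takeWhile (fun x => decide (x ≤ h)), x ≤ h := by
              intro x hx
              simpa using List.mem_takeWhile_imp hx
            have hdw : ∀ y, (t.dropWhile (fun x => decide (x ≤ h))).head? = some y → h < y := by
              intro y hy
              have hne : t.dropWhile (fun x => decide (x ≤ h)) ≠ [] := by
                intro hnil; rw [hnil] at hy; simp at hy
              have h5 := List.head?_dropWhile_not (fun x => decide (x ≤ h)) t
              rcases hd2 : t.dropWhile (fun x => decide (x ≤ h)) with _ | ⟨z, t₂⟩
              · exact absurd hd2 hne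
              · rw [hd2] at h5 hy
                simp only [List.head?_cons, Option.some.injEq] at hy
                subst hy
                simpa using lt_of_not_ge (by simpa using h5)
            have hne2 : t.takeWhile (fun x => decide (x ≤ h)) ≠ [] ∨ t.dropWhile (fun x => decide (x ≤ h)) ≠ [] := by
              by_contra hcon
              push_neg at hcon
              rw [hcon.1, hcon.2] at hsplit
              exact ht hsplit.symm
            have hinner := pv_innerA_eq (t.takeWhile (fun x => decide (x ≤ h))) 1 i []
              (t.dropWhile (fun x => decide (x ≤ h))) h (by simp) htw hdw hne2
            simp only [List.nil_append, List.length_nil, Nat.add_zero] at hinner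
            rw [hsplit] at hinner
            rw [hinner]
            have hlen : (t.takeWhile (fun x => decide (x ≤ h))).length
                + (t.dropWhile (fun x => decide (x ≤ h))).length = t.length := by
              rw [← List.length_append, hsplit]
            have := ih (i + 1 + (t.takeWhile (fun x => decide (x ≤ h))).length) (i + 1)
              (t.dropWhile (fun x => decide (x ≤ h)))
              (ans ++ [1 + ((t.takeWhile (fun x => decide (x ≤ h))).length : Int)])
              (by omega)
              (by simp only [List.length_cons] at hfuel; omega)
            simp only [List.sum_append, List.sum_cons, List.sum_nil, List.length_cons] at this ⊢
            push_cast at this ⊢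
            omega

-- strict bound: with a genuine 999 leading record, A loses at least one task from the counts
theorem pv_outerA_lt (fuel : Nat) : ∀ (m i : Nat) (q ans : List Int),
    pvRec999 q = true → i ≤ m → m + q.length ≤ fuel + i →
    (pvOuterA fuel (List.replicate m 999 ++ q) i ans).sum ≤ ans.sum + (q.length : Int) - 1 := by
  induction fuel with
  | zero =>
    intro m i q ans hrec him hfuel
    have hq : q = [] := by
      cases q with
      | nil => rfl
      | cons a b => exfalso; simp at hfuel; omega
    subst hq
    exact absurd hrec (by simp [pvRec999])
  | succ fuel ih =>
    intro m i q ans hrec him hfuel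
    rcases Nat.lt_or_ge i m with hlt | hge
    · have hgi : (List.replicate m (999 : Int) ++ q).getD i 0 = 999 := pv_getD_rep m i q hlt
      have hil : i < (List.replicate m (999 : Int) ++ q).length := by simp; omega
      simp only [pvOuterA, if_pos hil, hgi, if_pos rfl]
      exact ih m (i + 1) q ans hrec (by omega) (by omega)
    · have him' : i = m := le_antisymm him hge
      subst him'
      rcases q with _ | ⟨h, t⟩
      · exact absurd hrec (by simp [pvRec999])
      · have hgm : (List.replicate i (999 : Int) ++ h :: t).getD i 0 = h := by
          have := pv_getD_mid (List.replicate i (999 : Int)) h t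
          simpa using this
        have hil : i < (List.replicate i (999 : Int) ++ h :: t).length := by simp
        by_cases hh : h = 999
        · subst hh
          simp only [pvOuterA, if_pos hil, hgm, if_pos rfl]
          have hrw : List.replicate i (999 : Int) ++ 999 :: t
              = List.replicate (i + 1) (999 : Int) ++ t := by
            simp [List.replicate_succ']
          rw [hrw]
          have := pv_outerA_le fuel (i + 1) (i + 1) t ans (le_refl _) (by simp at hfuel; omega)
          simp only [List.length_cons]
          push_cast
          omega
        · obtain ⟨hlt999, hrec'⟩ := pv_rec999_drop_true h t hh hrec
          simp only [pvOuterA, if_pos hil, hgm, if_neg hh]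
          have ht : t ≠ [] := by
            intro hnil
            subst hnil
            simp only [pvRec999, Bool.or_eq_true, beq_iff_eq] at hrec
            rcases hrec with hr | hr
            · exact hh hr
            · exact absurd hr (by simp [pvRecAux])
          have hsplit : t.takeWhile (fun x => decide (x ≤ h)) ++ t.dropWhile (fun x => decide (x ≤ h)) = t :=
            List.takeWhile_append_dropWhile
          have htw : ∀ x ∈ t.takeWhile (fun x => decide (x ≤ h)), x ≤ h := by
            intro x hx
            simpa using List.mem_takeWhile_imp hx
          have hdw : ∀ y, (t.dropWhile (fun x => decide (x ≤ h))).head? = some y → h < y := by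
            intro y hy
            have hne : t.dropWhile (fun x => decide (x ≤ h)) ≠ [] := by
              intro hnil; rw [hnil] at hy; simp at hy
            have h5 := List.head?_dropWhile_not (fun x => decide (x ≤ h)) t
            rcases hd2 : t.dropWhile (fun x => decide (x ≤ h)) with _ | ⟨z, t₂⟩
            · exact absurd hd2 hne
            · rw [hd2] at h5 hy
              simp only [List.head?_cons, Option.some.injEq] at hy
              subst hy
              simpa using lt_of_not_ge (by simpa using h5)
          have hne2 : t.takeWhile (fun x => decide (x ≤ h)) ≠ [] ∨ t.dropWhile (fun x => decide (x ≤ h)) ≠ [] := by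
            by_contra hcon
            push_neg at hcon
            rw [hcon.1, hcon.2] at hsplit
            exact ht hsplit.symm
          have hinner := pv_innerA_eq (t.takeWhile (fun x => decide (x ≤ h))) 1 i []
            (t.dropWhile (fun x => decide (x ≤ h))) h (by simp) htw hdw hne2
          simp only [List.nil_append, List.length_nil, Nat.add_zero] at hinner
          rw [hsplit] at hinner
          rw [hinner]
          have hlen : (t.takeWhile (fun x => decide (x ≤ h))).length
              + (t.dropWhile (fun x => decide (x ≤ h))).length = t.length := by
            rw [← List.length_append, hsplit]
          have := ih (i + 1 + (t.takeWhile (fun x => decide (x ≤ h))).length) (i + 1)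
            (t.dropWhile (fun x => decide (x ≤ h)))
            (ans ++ [1 + ((t.takeWhile (fun x => decide (x ≤ h))).length : Int)])
            hrec' (by omega)
            (by simp only [List.length_cons] at hfuel; omega)
          simp only [List.sum_append, List.sum_cons, List.sum_nil, List.length_cons] at this ⊢
          push_cast at this ⊢
          omega

theorem solution_spec : Claim_unchanged_solution := by
  intro ps ss _ hpre hnd
  have hrec : pvRec999 (pvPeriods ps ss) = false := by
    rw [Bool.eq_false_iff]
    intro htrue
    exact hnd ((pv_rec999_iff (pvPeriods ps ss)).1 htrue)
  show solution ps ss = solution_alt ps ss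
  rw [pv_altB_eq]
  have hq := pv_periodsA_eq ps ss hpre.1
  simp only [solution]
  rw [hq]
  have := pv_outerA_eq (pvPeriods ps ss).length 0 0 (pvPeriods ps ss) [] hrec
    (le_refl 0) (by omega)
  simpa using this

theorem solution_changed : Claim_changed_solution := by
  unfold Claim_changed_solution; decide

theorem solution_tight : Claim_exact_solution := by
  intro ps ss _ hpre hD heq
  have hq := pv_periodsA_eq ps ss hpre.1
  have hrecT : pvRec999 (pvPeriods ps ss) = true := (pv_rec999_iff (pvPeriods ps ss)).2 hD
  have hA : solution ps ss = pvOuterA (pvPeriods ps ss).length (pvPeriods ps ss) 0 [] := by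
    simp only [solution]
    rw [hq]
  have hlt := pv_outerA_lt (pvPeriods ps ss).length 0 0 (pvPeriods ps ss) [] hrecT
    (le_refl 0) (by omega)
  simp only [List.replicate, List.nil_append, List.sum_nil, zero_add] at hlt
  have hsum : (solution ps ss).sum = (solution_alt ps ss).sum := by rw [heq]
  rw [hA] at hsum
  rw [pv_altB_eq ps ss, pv_grp_sum] at hsum
  omega
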